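-- pv_equiv track=rewrite | github.com/Wooyongjeong/python-algorithm-interview | 부록 B 2018 카카오 공채/3차/4 방금그곡.py | solution
-- ===== SOURCE A (Python) =====
-- def solution(m, musicinfos):
--     def sharp_to_lower(sound):
--         s = sound.replace('C#', 'c').replace('D#', 'd').replace('F#', 'd')\
--             .replace('G#', 'g').replace('A#', 'a')
--         return s
--
--     answer = []
--     m = sharp_to_lower(m)
--
--     for i, musicinfo in enumerate(musicinfos):
--         start, end, title, sound = musicinfo.split(',')
--         start = int(start[:2]) * 60 + int(start[3:])
--         end = int(end[:2]) * 60 + int(end[3:])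
--         playing_time = end - start
--         sound = sharp_to_lower(sound)
--         while playing_time > len(sound):
--             sound += sound
--         sound = sound[:playing_time]
--         if m in sound:
--             answer.append((playing_time, i, title))
--     if not answer:
--         return "(None)"
--     answer.sort(key=lambda x: (-x[0], x[1]))
--     return answer[0][-1]
-- ===== SOURCE B (Python) =====
-- def solution(m, musicinfos):
--     def sharp_to_lower(sound):
--         return sound.replace('C#', 'c').replace('D#', 'd').replace('F#', 'd')\
--             .replace('G#', 'g').replace('A#', 'a')
--
--     m = sharp_to_lower(m)
--     best = None  # (playing_time, title)
--     for musicinfo in musicinfos: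
--         start, end, title, sound = musicinfo.split(',')
--         playing_time = (int(end[:2]) * 60 + int(end[3:])) \
--             - (int(start[:2]) * 60 + int(start[3:]))
--         sound = sharp_to_lower(sound)
--         if playing_time <= len(sound):
--             played = sound[:playing_time]
--         else:
--             played = (sound * (playing_time // len(sound) + 1))[:playing_time]
--         if m in played and (best is None or playing_time > best[0]):
--             best = (playing_time, title)
--     return best[1] if best is not None else "(None)"
-- ===== Notes on version B (the rewrite author's own statement) =====
-- stated objective: simpler
-- what changed: B replaces A's sound-doubling while-loop with a closed-form repetition count and replaces the collect-all-matches-then-sort-by-(-time,index) pipeline with a single running best updated on a strict '>' comparison (so the earliest index wins ties).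
import Mathlib
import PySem

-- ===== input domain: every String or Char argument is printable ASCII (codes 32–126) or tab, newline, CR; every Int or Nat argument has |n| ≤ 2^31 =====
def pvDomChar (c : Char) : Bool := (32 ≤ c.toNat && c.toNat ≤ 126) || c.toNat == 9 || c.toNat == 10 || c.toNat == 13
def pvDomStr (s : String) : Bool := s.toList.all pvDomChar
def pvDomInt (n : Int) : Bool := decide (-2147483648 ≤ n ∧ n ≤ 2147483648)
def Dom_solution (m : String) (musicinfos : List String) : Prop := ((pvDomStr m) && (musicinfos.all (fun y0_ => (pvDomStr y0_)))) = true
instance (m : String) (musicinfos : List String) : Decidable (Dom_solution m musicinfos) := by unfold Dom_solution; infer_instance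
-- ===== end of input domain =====

-- B replaces A's append-to-a-list-then-sort-by-(-time,index) pipeline with a single running
-- best (strict '>' keeps the earliest index) and replaces the sound-doubling while-loop with
-- a closed-form repetition count; objective: simpler. (Both ports share the sharp_to_lower
-- helper, faithful to both Pythons.)

-- ===== PORT A =====
def sharpToLower (s : String) : String :=
  PySem.Str.replace (PySem.Str.replace (PySem.Str.replace (PySem.Str.replace
    (PySem.Str.replace s "C#" "c") "D#" "d") "F#" "d") "G#" "g") "A#" "a"

-- Python: `while playing_time > len(sound): sound += sound`.  The `s ≠ []` conjunct is only a
-- totality guard: where it differs (s = [] and len < pt) the Python loop diverges, which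
-- Pre_solution excludes.
def growSound (pt : Int) (s : List Char) : List Char :=
  if h : (s.length : Int) < pt ∧ s ≠ [] then growSound pt (s ++ s) else s
termination_by pt.toNat - s.length
decreasing_by
  have h1 : 0 < s.length := List.length_pos_iff.mpr h.2
  have h2 : (s.length : Int) < pt := h.1
  simp only [List.length_append]
  omega

-- one iteration of A's for-loop body (acc = answer so far, p = (i, musicinfo))
def stepA (mC : List Char) (acc : List (Int × Int × String)) (p : Int × String) :
    List (Int × Int × String) :=
  match PySem.Str.split? p.2 "," with
  | some [st, en, title, snd] =>
    match PySem.Int.ofStr? (PySem.Str.slice st none (some 2)),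
          PySem.Int.ofStr? (PySem.Str.slice st (some 3) none),
          PySem.Int.ofStr? (PySem.Str.slice en none (some 2)),
          PySem.Int.ofStr? (PySem.Str.slice en (some 3) none) with
    | some sh, some sm, some eh, some em =>
      let startT := sh * 60 + sm
      let endT := eh * 60 + em
      let pt := endT - startT
      let s1 := growSound pt (sharpToLower snd).toList
      let s2 := PySem.List.slice s1 none (some pt)
      if PySem.Chars.isIn mC s2 then acc ++ [(pt, p.1, title)] else acc
    | _, _, _, _ => acc  -- int() raises ValueError: outside Pre_solution
  | _ => acc             -- 4-way unpack of split(',') raises: outside Pre_solution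

def solution (m : String) (musicinfos : List String) : String :=
  let mC := (sharpToLower m).toList
  let answer := (PySem.List.enumerate musicinfos).foldl (stepA mC) []
  if answer = [] then "(None)"
  else
    match PySem.List.sorted2 answer (fun x => -x.1) (fun x => x.2.1) with
    | [] => "(None)"   -- unreachable (sorted2 is a permutation of answer ≠ [])
    | t :: _ => t.2.2

-- ===== PORT B =====
-- one iteration of B's loop: keep only the best (playing_time, title) so far
def stepB (mC : List Char) (best : Option (Int × String)) (info : String) :
    Option (Int × String) :=
  match PySem.Str.split? info "," with
  | some [st, en, title, snd] =>
    match PySem.Int.ofStr? (PySem.Str.slice st none (some 2)),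
          PySem.Int.ofStr? (PySem.Str.slice st (some 3) none),
          PySem.Int.ofStr? (PySem.Str.slice en none (some 2)),
          PySem.Int.ofStr? (PySem.Str.slice en (some 3) none) with
    | some sh, some sm, some eh, some em =>
      let pt := (eh * 60 + em) - (sh * 60 + sm)
      let s0 := (sharpToLower snd).toList
      let played :=
        if pt ≤ (s0.length : Int) then PySem.List.slice s0 none (some pt)
        else PySem.List.slice (PySem.List.pyRepeat s0 (PySem.Int.floordiv pt s0.length + 1))
               none (some pt)
      if PySem.Chars.isIn mC played &&
         (match best with | none => true | some b => decide (b.1 < pt)) then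
        some (pt, title)
      else best
    | _, _, _, _ => best  -- int() raises: outside Pre_solution
  | _ => best             -- unpack raises: outside Pre_solution

def solution_alt (m : String) (musicinfos : List String) : String :=
  let mC := (sharpToLower m).toList
  match musicinfos.foldl (stepB mC) none with
  | some b => b.2
  | none => "(None)"

-- ===== PRECONDITION & SPEC =====
-- Pre excludes exactly the inputs where Python A raises (split(',') not yielding 4 parts,
-- int() failing on the HH/MM slices) or diverges (empty converted sound with positive
-- playing_time makes A's while-loop loop forever).
def infoOk (info : String) : Bool :=
  match PySem.Str.split? info "," with
  | some [st, en, _, snd] =>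
    match PySem.Int.ofStr? (PySem.Str.slice st none (some 2)),
          PySem.Int.ofStr? (PySem.Str.slice st (some 3) none),
          PySem.Int.ofStr? (PySem.Str.slice en none (some 2)),
          PySem.Int.ofStr? (PySem.Str.slice en (some 3) none) with
    | some sh, some sm, some eh, some em =>
      decide ((sharpToLower snd).toList ≠ []) ||
      decide ((eh * 60 + em) - (sh * 60 + sm) ≤ ((sharpToLower snd).toList.length : Int))
    | _, _, _, _ => false
  | _ => false

def Pre_solution (m : String) (musicinfos : List String) : Prop :=
  musicinfos.all infoOk = true
instance (m : String) (musicinfos : List String) : Decidable (Pre_solution m musicinfos) := by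
  unfold Pre_solution; infer_instance

def pvWitness_solution : String × List String :=
  ("ABC", ["00:00,00:09,HELLO,ABCDE", "00:00,00:12,WORLD,ABCABC"])

def Spec_solution (m : String) (musicinfos : List String) (out : String) : Prop := out = solution_alt m musicinfos
instance (m : String) (musicinfos : List String) (out : String) : Decidable (Spec_solution m musicinfos out) := by unfold Spec_solution; infer_instance

-- ===== CLAIM (what is proved, stated in full; the proofs are below) =====
def Claim_equal_solution : Prop := ∀ (m : String) (musicinfos : List String), Dom_solution m musicinfos → Pre_solution m musicinfos → Spec_solution m musicinfos (solution m musicinfos)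

-- ===== LEMMAS AND PROOFS =====

-- the per-music "matched entry": some (playing_time, title) iff this music matches m
def entry (mC : List Char) (info : String) : Option (Int × String) :=
  match PySem.Str.split? info "," with
  | some [st, en, title, snd] =>
    match PySem.Int.ofStr? (PySem.Str.slice st none (some 2)),
          PySem.Int.ofStr? (PySem.Str.slice st (some 3) none),
          PySem.Int.ofStr? (PySem.Str.slice en none (some 2)),
          PySem.Int.ofStr? (PySem.Str.slice en (some 3) none) with
    | some sh, some sm, some eh, some em =>
      let pt := (eh * 60 + em) - (sh * 60 + sm)
      let s0 := (sharpToLower snd).toList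
      let played :=
        if pt ≤ (s0.length : Int) then PySem.List.slice s0 none (some pt)
        else PySem.List.slice (PySem.List.pyRepeat s0 (PySem.Int.floordiv pt s0.length + 1))
               none (some pt)
      if PySem.Chars.isIn mC played then some (pt, title) else none
    | _, _, _, _ => none
  | _ => none

-- the comparison sorted2 uses, on A's (playing_time, i, title) triples
def bef (a b : Int × Int × String) : Bool :=
  decide ((-a.1) < (-b.1)) || (!decide ((-b.1) < (-a.1)) && decide (a.2.1 < b.2.1))

def bstep (b : Option (Int × Int × String)) (x : Int × Int × String) :
    Option (Int × Int × String) :=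
  match b with
  | none => some x
  | some y => if bef x y then some x else some y

lemma rep_double (j : Nat) (s : List Char) :
    (List.replicate j (s ++ s)).flatten = (List.replicate (2 * j) s).flatten := by
  induction j with
  | zero => simp
  | succ j ih =>
    have h2 : 2 * (j + 1) = (2 * j + 1) + 1 := by ring
    simp only [List.replicate_succ, List.flatten_cons, h2, ih]
    simp [List.append_assoc]

lemma length_flatten_replicate (j : Nat) (s : List Char) :
    ((List.replicate j s).flatten).length = j * s.length := by
  induction j with
  | zero => simp
  | succ j ih => simp [List.replicate_succ, ih, Nat.succ_mul]; ring

lemma take_flatten_replicate_le (s : List Char) (n a b : Nat)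
    (hab : a ≤ b) (ha : n ≤ a * s.length) :
    ((List.replicate b s).flatten).take n = ((List.replicate a s).flatten).take n := by
  have hb : b = a + (b - a) := by omega
  rw [hb, List.replicate_add, List.flatten_append,
    List.take_append_of_le_length (by rw [length_flatten_replicate]; exact ha)]

lemma take_flatten_replicate (s : List Char) (n a b : Nat)
    (ha : n ≤ a * s.length) (hb : n ≤ b * s.length) :
    ((List.replicate a s).flatten).take n = ((List.replicate b s).flatten).take n := by
  rcases Nat.le_total a b with h | h
  · exact (take_flatten_replicate_le s n a b h ha).symm
  · exact take_flatten_replicate_le s n b a h hb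

lemma growSound_spec (pt : Int) (s : List Char) (h : s ≠ []) :
    ∃ j : Nat, growSound pt s = (List.replicate j s).flatten ∧
      pt ≤ ((growSound pt s).length : Int) := by
  fun_induction growSound pt s with
  | case1 s hcond ih =>
    obtain ⟨j, hj, hlen⟩ := ih (by simp [hcond.2])
    exact ⟨2 * j, by rw [hj, rep_double], hlen⟩
  | case2 s hcond =>
    refine ⟨1, by simp, ?_⟩
    rcases not_and_or.mp hcond with h1 | h2
    · omega
    · exact absurd h h2

lemma played_eq (pt : Int) (s : List Char) :
    PySem.List.slice (growSound pt s) none (some pt) =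
    if pt ≤ (s.length : Int) then PySem.List.slice s none (some pt)
    else PySem.List.slice (PySem.List.pyRepeat s (PySem.Int.floordiv pt s.length + 1))
           none (some pt) := by
  by_cases hle : pt ≤ (s.length : Int)
  · rw [if_pos hle, growSound, dif_neg (by push_neg; intro h; omega)]
  · rw [if_neg hle]
    push_neg at hle
    have hpt : 0 ≤ pt := by have := Int.natCast_nonneg s.length; omega
    by_cases hs : s = []
    · subst hs
      rw [growSound, dif_neg (by simp)]
      simp [PySem.List.pyRepeat, PySem.List.slice_to _ hpt]
    · obtain ⟨j, hj, hlen⟩ := growSound_spec pt s hs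
      have hslen : 0 < s.length := List.length_pos_iff.mpr hs
      rw [PySem.List.slice_to _ hpt, PySem.List.slice_to _ hpt, hj,
        PySem.List.pyRepeat]
      apply take_flatten_replicate
      · rw [hj, length_flatten_replicate] at hlen; omega
      · rw [PySem.Int.floordiv_eq_ediv_of_pos (by exact_mod_cast hslen)]
        have hq : 0 ≤ pt / (s.length : Int) := Int.ediv_nonneg hpt (by positivity)
        have hlt : pt < (pt / (s.length : Int) + 1) * (s.length : Int) :=
          Int.lt_ediv_add_one_mul_self pt (by exact_mod_cast hslen)
        have hcast : (((pt / (s.length : Int) + 1).toNat * s.length : Nat) : Int)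
            = (pt / (s.length : Int) + 1) * (s.length : Int) := by
          push_cast [Int.toNat_of_nonneg (by omega : (0:Int) ≤ pt / (s.length : Int) + 1)]
          ring
        exact Int.toNat_le.mpr (by rw [hcast]; exact le_of_lt hlt)

set_option maxHeartbeats 1000000 in
lemma stepA_eq (mC : List Char) (acc : List (Int × Int × String)) (p : Int × String) :
    stepA mC acc p =
      match entry mC p.2 with
      | none => acc
      | some e => acc ++ [(e.1, p.1, e.2)] := by
  unfold stepA entry
  split
  case h_2 => rfl
  split
  case h_2 => rfl
  dsimp only
  rw [played_eq]
  split <;> split <;> rfl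

lemma stepB_abs (c : Bool) (pt : Int) (title : String) (best : Option (Int × String)) :
    (if (c && (match best with | none => true | some b => decide (b.1 < pt))) = true
     then some (pt, title) else best) =
      (match (if c = true then some (pt, title) else none) with
      | none => best
      | some e' => match best with
        | none => some e'
        | some b => if b.1 < e'.1 then some e' else some b) := by
  cases c with
  | false => cases best <;> rfl
  | true =>
    cases best with
    | none => rfl
    | some b => by_cases h : b.1 < pt <;> simp [h]

set_option maxHeartbeats 1600000 in
lemma stepB_eq (mC : List Char) (best : Option (Int × String)) (info : String) :
    stepB mC best info =
      match entry mC info with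
      | none => best
      | some e =>
        match best with
        | none => some e
        | some b => if b.1 < e.1 then some e else some b := by
  unfold stepB entry
  split
  case h_2 => rfl
  split
  case h_2 => rfl
  dsimp only
  exact stepB_abs _ _ _ best

lemma head?_foldl_insertBy (before : Int × Int × String → Int × Int × String → Bool) :
    ∀ (l acc : List (Int × Int × String)),
      (l.foldl (fun a x => PySem.List.insertBy before x a) acc).head? =
      l.foldl (fun b x => match b with
        | none => some x
        | some y => if before x y then some x else some y) acc.head? := by
  intro l
  induction l with
  | nil => intro acc; rfl
  | cons x t ih =>
    intro acc
    rw [List.foldl_cons, List.foldl_cons, ih]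
    congr 1
    cases acc with
    | nil => rfl
    | cons h t' =>
      show (PySem.List.insertBy before x (h :: t')).head? = _
      cases hb : before x h <;> simp [PySem.List.insertBy, hb]

lemma foldl_bstep_append (mC : List Char) :
    ∀ (l : List (Int × String)) (acc : List (Int × Int × String))
      (b : Option (Int × Int × String)),
      (l.foldl (stepA mC) acc).foldl bstep b =
      l.foldl (fun bb p =>
        match entry mC p.2 with
        | none => bb
        | some e => bstep bb (e.1, p.1, e.2)) (acc.foldl bstep b) := by
  intro l
  induction l with
  | nil => intro acc b; rfl
  | cons p t ih =>
    intro acc b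
    rw [List.foldl_cons, List.foldl_cons, stepA_eq]
    cases he : entry mC p.2 with
    | none => rw [ih]
    | some e => rw [ih, List.foldl_append]; rfl

def OptRel (bA : Option (Int × Int × String)) (bB : Option (Int × String)) (i : Int) : Prop :=
  match bA, bB with
  | none, none => True
  | some a, some b => b = (a.1, a.2.2) ∧ a.2.1 < i
  | _, _ => False

lemma rel_fold (mC : List Char) :
    ∀ (infos : List String) (i0 : Int) (bA : Option (Int × Int × String))
      (bB : Option (Int × String)), OptRel bA bB i0 →
      OptRel ((PySem.List.enumerate infos i0).foldl (fun bb p =>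
          match entry mC p.2 with
          | none => bb
          | some e => bstep bb (e.1, p.1, e.2)) bA)
        (infos.foldl (fun bb info =>
          match entry mC info with
          | none => bb
          | some e => match bb with
            | none => some e
            | some b => if b.1 < e.1 then some e else some b) bB)
        (i0 + infos.length) := by
  intro infos
  induction infos with
  | nil => intro i0 bA bB h; simpa using h
  | cons info rest ih =>
    intro i0 bA bB h
    show OptRel ((PySem.List.enumerate rest (i0 + 1)).foldl _
        (match entry mC info with
         | none => bA
         | some e => bstep bA (e.1, i0, e.2))) _ _
    have hlen : i0 + ((info :: rest).length : Int) = (i0 + 1) + (rest.length : Int) := by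
      push_cast [List.length_cons]; omega
    rw [hlen]
    apply ih
    cases he : entry mC info with
    | none =>
      cases bA <;> cases bB <;> simp_all [OptRel]
      omega
    | some e =>
      simp only [he]
      cases bA with
      | none =>
        cases bB with
        | none => dsimp only [bstep, OptRel]; exact ⟨by simp, by omega⟩
        | some b => exact absurd h (by simp [OptRel])
      | some a =>
        cases bB with
        | none => exact absurd h (by simp [OptRel])
        | some b =>
          have hb : b = (a.1, a.2.2) := h.1
          have hlt : a.2.1 < i0 := h.2
          dsimp only [bstep, OptRel]
          have hbef : bef (e.1, i0, e.2) a = decide (a.1 < e.1) := by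
            simp only [bef]
            have h0 : decide (i0 < a.2.1) = false := by simp; omega
            simp only [h0, Bool.and_false, Bool.or_false]
            congr 1
            simp
          rw [hbef, hb]
          dsimp only
          by_cases hc : a.1 < e.1
          · rw [if_pos (by simpa using hc), if_pos hc]
            exact ⟨by simp, by dsimp only; omega⟩
          · rw [if_neg (by simpa using hc), if_neg hc]
            exact ⟨rfl, by omega⟩

-- ===== VERDICT (by name: the statement is the Claim_ definition above) =====
theorem solution_spec : Claim_equal_solution := by
  intro m infos _hd _hp
  unfold Spec_solution
  simp only [solution, solution_alt]
  have hrel : OptRel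
      (((PySem.List.enumerate infos).foldl (stepA ((sharpToLower m).toList)) []).foldl bstep none)
      (infos.foldl (stepB ((sharpToLower m).toList)) none)
      (0 + (infos.length : Int)) := by
    rw [foldl_bstep_append]
    have hB : infos.foldl (stepB ((sharpToLower m).toList)) none =
        infos.foldl (fun bb info =>
          match entry ((sharpToLower m).toList) info with
          | none => bb
          | some e => match bb with
            | none => some e
            | some b => if b.1 < e.1 then some e else some b) none :=
      congrArg (fun f => List.foldl f none infos)
        (funext fun b => funext fun i => stepB_eq ((sharpToLower m).toList) b i)
    rw [hB]
    exact rel_fold ((sharpToLower m).toList) infos 0 none none trivial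
  have hhead : ∀ answer : List (Int × Int × String),
      (PySem.List.sorted2 answer (fun x => -x.1) (fun x => x.2.1)).head? =
        answer.foldl bstep none :=
    fun answer => head?_foldl_insertBy bef answer []
  by_cases hnil : (PySem.List.enumerate infos).foldl (stepA ((sharpToLower m).toList)) [] = []
  · rw [if_pos hnil]
    rw [hnil] at hrel
    cases hfold : infos.foldl (stepB ((sharpToLower m).toList)) none with
    | none => rfl
    | some b => rw [hfold] at hrel; exact False.elim hrel
  · rw [if_neg hnil]
    have hs2ne : PySem.List.sorted2 ((PySem.List.enumerate infos).foldl
        (stepA ((sharpToLower m).toList)) []) (fun x => -x.1) (fun x => x.2.1) ≠ [] := by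
      intro hs2
      have hperm := PySem.List.sorted2_perm ((PySem.List.enumerate infos).foldl
        (stepA ((sharpToLower m).toList)) []) (fun x => -x.1) (fun x => x.2.1) false
      rw [hs2] at hperm
      exact hnil (List.Perm.eq_nil hperm.symm)
    obtain ⟨t, rest, heq⟩ := List.exists_cons_of_ne_nil hs2ne
    rw [heq]
    have hfoldval : ((PySem.List.enumerate infos).foldl
        (stepA ((sharpToLower m).toList)) []).foldl bstep none = some t := by
      rw [← hhead, heq]; rfl
    rw [hfoldval] at hrel
    cases hfold : infos.foldl (stepB ((sharpToLower m).toList)) none with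
    | none => rw [hfold] at hrel; exact False.elim hrel
    | some b =>
      rw [hfold] at hrel
      rw [hrel.1]
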